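/- GENERATED by farm/mkstatement.py from design/units.tsv (unit `DGifGetScreenDesc.P`) and the assertions of Gif/Spec/Seg_DGifGetScreenDesc.lean — do not edit.
   THE STATEMENT of the proof unit `DGifGetScreenDesc.P`: segment P of `DGifGetScreenDesc` (15 instructions; entries 0x108080;
   exits 0x1080c6; ranges 0x108080-0x1080c6)
   takes each of its entry assertions to one of its exit assertions (`Gif.Spec.DGifGetScreenDesc.SegP`), given the contracts of its callees.
   What the names mean: ProgX/Base/Spec/Basic.lean (the shared hypotheses), Gif/Spec/Seg_DGifGetScreenDesc.lean (the assertions). The theorem to prove: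
   `theorem DGifGetScreenDesc_P_ok : Gif.Spec.DGifGetScreenDesc_P.Statement`. -/
import Gif.Code
import Gif.Dec.All
import Gif.Labels
import Gif.Spec.Seg_DGifGetScreenDesc
namespace Gif.Spec.DGifGetScreenDesc_P
open X86 X86.User Asan

/-- The statement of unit `DGifGetScreenDesc.P`. -/
def Statement : Prop :=
  ∀ (Lay : Layout) (_hLay : Lay.hi = 0x1000000) (μ : Microarch) (_hμ : UserX.MicroOK μ) (u₀ : State)
    (_hcode : HasCodeNat Lay u₀ Gif.L.DGifGetScreenDesc.entry Gif.Code.code_DGifGetScreenDesc.nat Gif.L.DGifGetScreenDesc.size),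
    Gif.Spec.DGifGetScreenDesc.SegP Lay μ u₀

end Gif.Spec.DGifGetScreenDesc_P
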